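-- pv_equiv track=rewrite | github.com/rimopa/intesim | src/intesim/intesim.py | _can_apocopate
-- ===== SOURCE A (Python) =====
-- def _can_apocopate(n: int) -> bool:
--     "Wether n can be apocopated (supress sound at the end)."
--     if n in (1, 3, 13):
--         return True
--     if 20 <= n <= 99:
--         return n % 10 in (1, 3)
--     if 100 <= n <= 999:
--         return _can_apocopate(n % 100)
--     if 1_000 <= n <= 999_999:
--         return _can_apocopate(n % 1000)
--     if 1_000_000 <= n <= 999_999_999:
--         return _can_apocopate(n % 1_000_000)
--     return False
-- ===== SOURCE B (Python) =====
-- def _can_apocopate(n: int) -> bool: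
--     "Wether n can be apocopated (supress sound at the end)."
--     if n < 1 or n > 999_999_999:
--         return False
--     m = n % 100
--     return m in (1, 3, 13) or (20 <= m <= 99 and m % 10 in (1, 3))
-- ===== Notes on version B (the rewrite author's own statement) =====
-- stated objective: simpler
-- what changed: Replaces the layered recursion that peels off million/thousand/hundred blocks by a closed form: a single range guard plus a direct test on the last two digits of n.
import Mathlib
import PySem

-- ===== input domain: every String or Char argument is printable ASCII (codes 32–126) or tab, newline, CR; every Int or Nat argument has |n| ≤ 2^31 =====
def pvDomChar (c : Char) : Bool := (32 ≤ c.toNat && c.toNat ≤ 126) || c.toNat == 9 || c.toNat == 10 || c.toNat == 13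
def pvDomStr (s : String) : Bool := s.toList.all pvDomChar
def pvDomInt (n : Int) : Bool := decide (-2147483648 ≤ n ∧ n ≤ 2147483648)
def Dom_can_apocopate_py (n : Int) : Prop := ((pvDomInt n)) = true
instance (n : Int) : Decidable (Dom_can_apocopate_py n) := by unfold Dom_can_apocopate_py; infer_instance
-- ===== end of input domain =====

-- ===== PORT A =====
-- Literal transliteration of A's recursion; termination: each recursive call passes n % d with 0 ≤ n % d < d ≤ n.
def can_apocopate_py (n : Int) : Bool :=
  if n = 1 ∨ n = 3 ∨ n = 13 then true
  else if 20 ≤ n ∧ n ≤ 99 then decide (PySem.Int.mod n 10 = 1 ∨ PySem.Int.mod n 10 = 3)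
  else if 100 ≤ n ∧ n ≤ 999 then can_apocopate_py (PySem.Int.mod n 100)
  else if 1000 ≤ n ∧ n ≤ 999999 then can_apocopate_py (PySem.Int.mod n 1000)
  else if 1000000 ≤ n ∧ n ≤ 999999999 then can_apocopate_py (PySem.Int.mod n 1000000)
  else false
termination_by n.toNat
decreasing_by
  all_goals
    simp only [PySem.Int.mod_eq_emod_of_pos (by omega : (0:Int) < 100),
      PySem.Int.mod_eq_emod_of_pos (by omega : (0:Int) < 1000),
      PySem.Int.mod_eq_emod_of_pos (by omega : (0:Int) < 1000000)]
  all_goals omega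

-- ===== PORT B =====
-- B: closed form — guard the range, then decide from the last two digits m = n % 100.
def can_apocopate_py_alt (n : Int) : Bool :=
  if n < 1 ∨ n > 999999999 then false
  else
    let m := PySem.Int.mod n 100
    decide (m = 1 ∨ m = 3 ∨ m = 13) ||
      decide ((20 ≤ m ∧ m ≤ 99) ∧ (PySem.Int.mod m 10 = 1 ∨ PySem.Int.mod m 10 = 3))

-- ===== PRECONDITION & SPEC =====
def Spec_can_apocopate_py (n : Int) (out : Bool) : Prop := out = can_apocopate_py_alt n
instance (n : Int) (out : Bool) : Decidable (Spec_can_apocopate_py n out) := by unfold Spec_can_apocopate_py; infer_instance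

-- ===== CLAIM (what is proved, stated in full; the proofs are below) =====
def Claim_equal_can_apocopate_py : Prop := ∀ (n : Int), Dom_can_apocopate_py n → Spec_can_apocopate_py n (can_apocopate_py n)

-- ===== LEMMAS AND PROOFS =====

-- The closed-form condition both programs compute (Lean's % on Int with a positive divisor = Python's %).
def apoCond (n : Int) : Prop :=
  1 ≤ n ∧ n ≤ 999999999 ∧
    (n % 100 = 1 ∨ n % 100 = 3 ∨ n % 100 = 13 ∨
      (20 ≤ n % 100 ∧ n % 100 ≤ 99 ∧ (n % 100 % 10 = 1 ∨ n % 100 % 10 = 3)))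

lemma alt_iff (n : Int) : can_apocopate_py_alt n = true ↔ apoCond n := by
  simp only [can_apocopate_py_alt, apoCond,
    PySem.Int.mod_eq_emod_of_pos (by omega : (0:Int) < 100),
    PySem.Int.mod_eq_emod_of_pos (by omega : (0:Int) < 10)]
  split_ifs with h
  · simp; omega
  · simp only [Bool.or_eq_true, decide_eq_true_eq]
    constructor
    · rintro (h1 | h2) <;> omega
    · intro h1; omega

lemma a_iff (k : Nat) (n : Int) (hk : n.toNat ≤ k) : can_apocopate_py n = true ↔ apoCond n := by
  induction k generalizing n with
  | zero =>
    rw [can_apocopate_py]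
    simp only [PySem.Int.mod_eq_emod_of_pos (by omega : (0:Int) < 10)]
    split_ifs with h1 h2 h3 h4 h5 <;> simp only [apoCond] <;> simp <;> omega
  | succ k ih =>
    rw [can_apocopate_py]
    simp only [PySem.Int.mod_eq_emod_of_pos (by omega : (0:Int) < 10),
      PySem.Int.mod_eq_emod_of_pos (by omega : (0:Int) < 100),
      PySem.Int.mod_eq_emod_of_pos (by omega : (0:Int) < 1000),
      PySem.Int.mod_eq_emod_of_pos (by omega : (0:Int) < 1000000)]
    split_ifs with h1 h2 h3 h4 h5
    · simp only [apoCond]; simp; omega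
    · simp only [apoCond]; simp; omega
    · rw [ih (n % 100) (by omega)]; simp only [apoCond]; omega
    · rw [ih (n % 1000) (by omega)]; simp only [apoCond]; omega
    · rw [ih (n % 1000000) (by omega)]; simp only [apoCond]; omega
    · simp only [apoCond]; simp; omega

-- ===== VERDICT (by name: the statement is the Claim_ definition above) =====
theorem can_apocopate_py_spec : Claim_equal_can_apocopate_py := by
  intro n _
  unfold Spec_can_apocopate_py
  have hA := a_iff n.toNat n le_rfl
  have hB := alt_iff n
  cases h1 : can_apocopate_py n <;> cases h2 : can_apocopate_py_alt n <;> simp_all
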